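-- pv_equiv track=rewrite | github.com/LhetMagnan/alx-higher_level_programming | 0x03-python-data_structures/4-new_in_list.py | new_in_list
-- ===== SOURCE A (Python) =====
-- def new_in_list(my_list, idx, element):
--     replaced = []
--     for i in range(len(my_list)):
--         replaced.append(my_list[i])
--     if idx < 0:
--         return replaced
--     elif idx >= len(my_list):
--         return replaced
--     else:
--         replaced [idx] = element
--         return replaced
-- ===== SOURCE B (Python) =====
-- def new_in_list(my_list, idx, element):
--     return [element if i == idx else x for i, x in enumerate(my_list)]
-- ===== Notes on version B (the rewrite author's own statement) =====
-- stated objective: alternative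
-- what changed: Replaces A's index-loop copy followed by an in-place overwrite under explicit bounds checks with a single comprehension over enumerate that selects element exactly at position idx; out-of-range idx needs no guard because no position matches it.
import Mathlib
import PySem

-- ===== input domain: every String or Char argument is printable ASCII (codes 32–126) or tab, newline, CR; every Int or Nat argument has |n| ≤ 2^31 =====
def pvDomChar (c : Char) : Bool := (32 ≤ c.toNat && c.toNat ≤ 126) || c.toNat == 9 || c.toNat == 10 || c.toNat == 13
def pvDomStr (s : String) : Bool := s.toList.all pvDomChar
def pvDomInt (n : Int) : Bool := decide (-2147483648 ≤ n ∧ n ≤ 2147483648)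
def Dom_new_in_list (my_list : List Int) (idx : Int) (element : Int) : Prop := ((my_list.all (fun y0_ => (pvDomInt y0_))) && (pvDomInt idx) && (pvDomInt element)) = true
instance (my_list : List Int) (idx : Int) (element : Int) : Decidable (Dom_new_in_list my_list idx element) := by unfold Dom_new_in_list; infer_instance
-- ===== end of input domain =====

-- B replaces A's index-loop copy + in-place overwrite under bounds checks with a single
-- comprehension over enumerate that selects element exactly at position idx (no guard needed).
-- ===== PORT A =====
-- A: build 'replaced' by appending my_list[i] for i in range(len); then overwrite at idx if in bounds.
def new_in_list (my_list : List Int) (idx : Int) (element : Int) : List Int :=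
  let replaced :=
    (PySem.List.pyRange 0 (PySem.List.len my_list) 1).foldl
      (fun acc i => acc ++ [PySem.List.pyGetD my_list i 0]) []
  if idx < 0 then replaced
  else if idx ≥ PySem.List.len my_list then replaced
  else replaced.set idx.toNat element  -- replaced[idx] = element, exact: here 0 ≤ idx < len

-- ===== PORT B =====
def new_in_list_alt (my_list : List Int) (idx : Int) (element : Int) : List Int :=
  (PySem.List.enumerate my_list).map (fun p => if p.1 == idx then element else p.2)

-- ===== PRECONDITION & SPEC =====
def Spec_new_in_list (my_list : List Int) (idx : Int) (element : Int) (out : List Int) : Prop := out = new_in_list_alt my_list idx element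
instance (my_list : List Int) (idx : Int) (element : Int) (out : List Int) : Decidable (Spec_new_in_list my_list idx element out) := by unfold Spec_new_in_list; infer_instance

-- ===== CLAIM (what is proved, stated in full; the proofs are below) =====
def Claim_equal_new_in_list : Prop := ∀ (my_list : List Int) (idx : Int) (element : Int), Dom_new_in_list my_list idx element → Spec_new_in_list my_list idx element (new_in_list my_list idx element)

-- ===== LEMMAS AND PROOFS =====

-- ===== VERDICT (by name: the statement is the Claim_ definition above) =====
-- the copy loop rebuilds my_list
theorem copy_loop_eq (l : List Int) :
    (PySem.List.pyRange 0 (PySem.List.len l) 1).foldl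
      (fun acc i => acc ++ [PySem.List.pyGetD l i 0]) [] = l := by
  rw [PySem.List.foldl_pyRange_zero_pyGetD l 0 (fun acc v => acc ++ [v]) []]
  induction l using List.reverseRecOn with
  | nil => rfl
  | append_singleton xs x ih => simp [List.foldl_append, ih]

-- the enumerate-map equals List.set for in-range idx and identity otherwise, at any start offset
theorem alt_enum (l : List Int) (s idx e : Int) :
    (PySem.List.enumerate l s).map (fun p => if p.1 == idx then e else p.2) =
      if s ≤ idx ∧ idx < s + (l.length : Int) then l.set (idx - s).toNat e else l := by
  induction l generalizing s with
  | nil => simp [PySem.List.enumerate_nil]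
  | cons x xs ih =>
    rw [PySem.List.enumerate_cons, List.map_cons, ih (s + 1)]
    by_cases hz : s = idx
    · have h1 : (s == idx) = true := by simpa using hz
      have h2 : ¬ (s + 1 ≤ idx ∧ idx < s + 1 + (xs.length : Int)) := by omega
      have h3 : s ≤ idx ∧ idx < s + ((x :: xs).length : Int) := by simp; omega
      simp only [h1, if_true, if_neg h2, if_pos h3]
      have : (idx - s).toNat = 0 := by omega
      simp [this]
    · have h1 : ¬ (s == idx) = true := by simpa using hz
      simp only [h1, Bool.false_eq_true, if_false]
      by_cases h2 : s + 1 ≤ idx ∧ idx < s + 1 + (xs.length : Int)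
      · have h3 : s ≤ idx ∧ idx < s + ((x :: xs).length : Int) := by simp at h2 ⊢; omega
        have h4 : (idx - s).toNat = (idx - (s + 1)).toNat + 1 := by omega
        simp only [if_pos h2, if_pos h3, h4, List.set]
      · have h3 : ¬ (s ≤ idx ∧ idx < s + ((x :: xs).length : Int)) := by simp at h2 ⊢; omega
        simp only [if_neg h2, if_neg h3]

theorem new_in_list_spec : Claim_equal_new_in_list := by
  intro l idx e _
  unfold Spec_new_in_list new_in_list
  have hc := copy_loop_eq l
  simp only [PySem.List.len_eq] at hc ⊢
  rw [hc]
  unfold new_in_list_alt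
  rw [show PySem.List.enumerate l = PySem.List.enumerate l 0 from rfl, alt_enum l 0 idx e]
  by_cases h1 : idx < 0
  · rw [if_pos h1, if_neg (by omega)]
  · by_cases h2 : idx ≥ (l.length : Int)
    · rw [if_neg h1, if_pos h2, if_neg (by omega)]
    · rw [if_neg h1, if_neg h2, if_pos (by omega)]
      norm_num
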